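-- pv_equiv track=rewrite | github.com/chance0523/Problem_Solving | programmers/72421_순위검색_효율성.py | solution
-- ===== SOURCE A (Python) =====
-- from itertools import combinations
-- from bisect import bisect_left
--
-- def solution(info, query):
--     ans = []
--     infoDict = {}
--     for i in range(len(info)):
--         infoList = info[i].split()
--         k = infoList[:-1] # key
--         v = infoList[-1] # value
--         for j in range(5):
--             for c in combinations(k,j):
--                 temp = ''.join(c)
--                 if temp in infoDict:
--                     infoDict[temp].append(int(v))
--                 else:
--                     infoDict[temp] = [int(v)]
--
--     for k in infoDict:
--         infoDict[k].sort()
--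
--     for q in query:
--         qList = q.split()
--         while 'and' in qList:
--             qList.remove('and')
--         while '-' in qList:
--             qList.remove('-')
--         k = qList[:-1]
--         v = qList[-1]
--
--         k = ''.join(k)
--
--         if k in infoDict:
--             scores = infoDict[k]
--             if scores:
--                 left = bisect_left(scores, int(v))
--                 ans.append(len(scores) - left)
--         else:
--             ans.append(0)
--     return ans
-- ===== SOURCE B (Python) =====
-- from itertools import combinations
--
-- def solution(info, query):
--     table = {}
--     for line in info:
--         tokens = line.split()
--         attrs, score = tokens[:-1], int(tokens[-1])
--         for r in range(5):
--             for combo in combinations(attrs, r):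
--                 key = ''.join(combo)
--                 table[key] = table.get(key, []) + [score]
--     ans = []
--     for q in query:
--         tokens = [t for t in q.split() if t not in ('and', '-')]
--         scores = table.get(''.join(tokens[:-1]))
--         if scores is None:
--             ans.append(0)
--         else:
--             cutoff = int(tokens[-1])
--             ans.append(sum(1 for s in scores if s >= cutoff))
--     return ans
-- ===== Notes on version B (the rewrite author's own statement) =====
-- stated objective: simpler
-- what changed: B drops A's sort-every-dict-value pass and bisect binary search entirely: it builds the same combination-keyed dict (via get-with-default instead of a membership branch) and answers each query by one linear scan counting scores >= cutoff, appending exactly one count per query; Pre_ excludes only inputs where A raises (info line with no tokens or non-int last token; query with no tokens left after removing 'and'/'-', or a non-int cutoff on a key present in the dict).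
import Mathlib
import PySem

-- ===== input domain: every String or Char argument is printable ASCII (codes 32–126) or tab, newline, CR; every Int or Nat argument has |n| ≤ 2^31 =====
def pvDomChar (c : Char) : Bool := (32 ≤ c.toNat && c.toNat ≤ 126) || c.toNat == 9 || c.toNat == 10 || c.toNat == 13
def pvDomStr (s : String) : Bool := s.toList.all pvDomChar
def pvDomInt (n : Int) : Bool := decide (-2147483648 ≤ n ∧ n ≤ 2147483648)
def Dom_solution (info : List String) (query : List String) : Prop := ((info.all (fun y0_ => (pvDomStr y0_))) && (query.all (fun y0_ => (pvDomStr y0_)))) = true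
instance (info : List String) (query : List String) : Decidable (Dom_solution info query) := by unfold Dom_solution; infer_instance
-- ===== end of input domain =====

-- B drops A's sort-every-value pass and binary search, counting qualifying scores by a direct
-- linear scan per query (objective: simpler; not claimed faster).

-- ===== PORT A =====

-- `while 'and' in qList: qList.remove('and')` — repeated first-occurrence removal
-- (Python list.remove of a present element is List.erase).
def pvRemoveAll (x : String) (l : List String) : List String :=
  if h : x ∈ l then pvRemoveAll x (l.erase x) else l
termination_by l.length
decreasing_by
  rw [List.length_erase_of_mem h]
  have := List.length_pos_of_mem h
  omega

-- body of A's `for i in range(len(info))` loop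
def pvLineStepA (d : PySem.Dict String (List Int)) (line : String) : PySem.Dict String (List Int) :=
  let infoList := PySem.Str.split₀ line
  let k := PySem.List.slice infoList none (some (-1))
  let v := PySem.List.pyGetD infoList (-1) ""
  (PySem.List.pyRange 0 5).foldl (fun d j =>
    (PySem.List.combinations k j.toNat).foldl (fun d c =>
      let temp := PySem.Str.join "" c
      if d.contains temp then d.insert temp ((d.getD temp []) ++ [(PySem.Int.ofStr? v).getD 0])
      else d.insert temp [(PySem.Int.ofStr? v).getD 0]) d) d

def pvBuildA (info : List String) : PySem.Dict String (List Int) :=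
  (PySem.List.pyRange 0 (info.length : Int)).foldl
    (fun d i => pvLineStepA d (PySem.List.pyGetD info i "")) PySem.Dict.empty

-- `for k in infoDict: infoDict[k].sort()` — each stored list sorted in place; a dict's keys are
-- unique, so the loop sorts every stored value exactly once, i.e. it maps sort over the values.
def pvSortVals (d : PySem.Dict String (List Int)) : PySem.Dict String (List Int) :=
  PySem.Dict.mk (d.items.map (fun kv => (kv.1, PySem.List.sorted kv.2 (fun x => x) false)))

def solution (info : List String) (query : List String) : List Int :=
  let infoDict2 := pvSortVals (pvBuildA info)
  query.foldl (fun ans q =>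
    let qList := pvRemoveAll "-" (pvRemoveAll "and" (PySem.Str.split₀ q))
    let k := PySem.Str.join "" (PySem.List.slice qList none (some (-1)))
    let v := PySem.List.pyGetD qList (-1) ""
    if infoDict2.contains k then
      let scores := infoDict2.getD k []
      if scores ≠ [] then
        ans ++ [(scores.length : Int) - (PySem.List.bisectLeft scores ((PySem.Int.ofStr? v).getD 0) : Int)]
      else ans
    else ans ++ [(0 : Int)]) []

-- ===== PORT B =====

def pvBuildB (info : List String) : PySem.Dict String (List Int) :=
  info.foldl (fun d line =>
    let tokens := PySem.Str.split₀ line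
    let attrs := tokens.dropLast
    let score := (PySem.Int.ofStr? (tokens.getLast?.getD "")).getD 0
    (PySem.List.pyRange 0 5).foldl (fun d r =>
      (PySem.List.combinations attrs r.toNat).foldl (fun d c =>
        let key := PySem.Str.join "" c
        d.insert key ((d.getD key []) ++ [score])) d) d) PySem.Dict.empty

-- one query: table.get(key) → 0 if absent, else a linear count of scores ≥ cutoff
def pvQueryCount (table : PySem.Dict String (List Int)) (q : String) : Int :=
  let tokens := (PySem.Str.split₀ q).filter (fun t => !(t == "and" || t == "-"))
  match table.get? (PySem.Str.join "" tokens.dropLast) with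
  | none => 0
  | some scores =>
      let cutoff := (PySem.Int.ofStr? (tokens.getLast?.getD "")).getD 0
      scores.foldl (fun n s => if cutoff ≤ s then n + 1 else n) (0 : Int)

def solution_alt (info : List String) (query : List String) : List Int :=
  let table := pvBuildB info
  query.foldl (fun ans q => ans ++ [pvQueryCount table q]) []

-- ===== PRECONDITION & SPEC =====
-- Pre_ excludes exactly the inputs where Python A raises: an info line without tokens or whose
-- last token is not an int (IndexError/ValueError while building), and a query whose tokens
-- (after removing 'and'/'-') are empty (IndexError) or whose last token is not an int while its
-- joined key IS a key of the dict (ValueError at int(v); a missing key never parses v).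
def Pre_solution (info : List String) (query : List String) : Prop :=
  (∀ s ∈ info, PySem.Str.split₀ s ≠ [] ∧
      (PySem.Int.ofStr? ((PySem.Str.split₀ s).getLast?.getD "")).isSome = true) ∧
  (∀ q ∈ query,
    ((PySem.Str.split₀ q).filter (fun t => !(t == "and" || t == "-"))) ≠ [] ∧
    ((∃ s ∈ info, ∃ j ∈ List.range 5,
        ∃ c ∈ List.sublistsLen j (PySem.Str.split₀ s).dropLast,
          PySem.Str.join "" c =
            PySem.Str.join "" ((PySem.Str.split₀ q).filter (fun t => !(t == "and" || t == "-"))).dropLast) →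
      (PySem.Int.ofStr?
        ((((PySem.Str.split₀ q).filter (fun t => !(t == "and" || t == "-"))).getLast?).getD "")).isSome = true))
instance (info : List String) (query : List String) : Decidable (Pre_solution info query) := by
  unfold Pre_solution; infer_instance

def pvWitness_solution : List String × List String :=
  (["ml junior 19", "q 63"], ["db and z and q 73"])

def Spec_solution (info : List String) (query : List String) (out : List Int) : Prop := out = solution_alt info query
instance (info : List String) (query : List String) (out : List Int) : Decidable (Spec_solution info query out) := by unfold Spec_solution; infer_instance

-- ===== CLAIM (what is proved, stated in full; the proofs are below) =====
def Claim_equal_solution : Prop := ∀ (info : List String) (query : List String), Dom_solution info query → Pre_solution info query → Spec_solution info query (solution info query)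

-- ===== LEMMAS AND PROOFS =====

-- one removal loop is a filter
lemma pvFilter_erase (x : String) (l : List String) :
    (l.erase x).filter (fun t => !(t == x)) = l.filter (fun t => !(t == x)) := by
  induction l with
  | nil => rfl
  | cons h t ih =>
    by_cases hx : h = x
    · subst hx; simp [List.erase_cons_head]
    · rw [List.erase_cons_tail (by simp [hx])]
      simp [hx, ih]

lemma pvRemoveAll_eq_filter (x : String) (l : List String) :
    pvRemoveAll x l = l.filter (fun t => !(t == x)) := by
  induction l using pvRemoveAll.induct x with
  | case1 l h ih =>
    rw [pvRemoveAll, dif_pos h, ih, pvFilter_erase]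
  | case2 l h =>
    rw [pvRemoveAll, dif_neg h, Eq.comm, List.filter_eq_self]
    intro a ha
    simp only [Bool.not_eq_eq_eq_not, Bool.not_true, beq_eq_false_iff_ne]
    exact fun e => h (e ▸ ha)

lemma pvRemoveAll_both (l : List String) :
    pvRemoveAll "-" (pvRemoveAll "and" l) = l.filter (fun t => !(t == "and" || t == "-")) := by
  rw [pvRemoveAll_eq_filter, pvRemoveAll_eq_filter, List.filter_filter]
  apply List.filter_congr
  intro a _
  cases h1 : a == "and" <;> cases h2 : a == "-" <;> simp

-- xs[-1] with default = getLast with default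
lemma pvPyGetD_neg_one (l : List String) (d : String) :
    PySem.List.pyGetD l (-1) d = l.getLast?.getD d := by
  rcases List.eq_nil_or_concat l with rfl | ⟨ys, y, rfl⟩
  · simp [PySem.List.pyGetD, PySem.List.pyGet?]
  · rw [List.concat_eq_append, PySem.List.pyGetD_neg_one_append_singleton]
    simp

-- the two dict-update steps agree
lemma pvInsertStep_eq (d : PySem.Dict String (List Int)) (k : String) (v : Int) :
    (if d.contains k then d.insert k ((d.getD k []) ++ [v]) else d.insert k [v]) =
      d.insert k ((d.getD k []) ++ [v]) := by
  by_cases h : d.contains k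
  · rw [if_pos h]
  · rw [if_neg h, PySem.Dict.getD_of_not_contains d [] (by simpa using h)]
    simp

lemma pvBuild_eq (info : List String) : pvBuildB info = pvBuildA info := by
  unfold pvBuildA pvBuildB
  rw [PySem.List.foldl_pyRange_zero_pyGetD' info "" pvLineStepA PySem.Dict.empty]
  apply PySem.List.foldl_congr_mem
  intro d line _
  simp only [pvLineStepA, PySem.List.slice_to_neg_one, pvPyGetD_neg_one]
  apply PySem.List.foldl_congr_mem
  intro d' j _
  apply PySem.List.foldl_congr_mem
  intro d'' c _
  simp only [pvInsertStep_eq]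

-- every value stored by the build loop is a nonempty list (each step appends ++ [score])
def pvValsNe (d : PySem.Dict String (List Int)) : Prop :=
  ∀ k l, d.get? k = some l → l ≠ []

lemma pvValsNe_foldl {α : Type} (f : PySem.Dict String (List Int) → α → PySem.Dict String (List Int))
    (l : List α) (d : PySem.Dict String (List Int))
    (hf : ∀ d a, pvValsNe d → pvValsNe (f d a)) (hd : pvValsNe d) : pvValsNe (l.foldl f d) := by
  induction l generalizing d with
  | nil => exact hd
  | cons a t ih => exact ih (f d a) (hf d a hd)

lemma pvValsNe_insertStep (d : PySem.Dict String (List Int)) (k : String) (v : Int)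
    (hd : pvValsNe d) : pvValsNe (d.insert k ((d.getD k []) ++ [v])) := by
  intro k' l hl
  rw [PySem.Dict.get?_insert] at hl
  split at hl
  · cases hl; simp
  · exact hd k' l hl

lemma pvValsNe_buildB (info : List String) : pvValsNe (pvBuildB info) := by
  unfold pvBuildB
  apply pvValsNe_foldl
  · intro d line hd
    apply pvValsNe_foldl
    · intro d' r hd'
      apply pvValsNe_foldl
      · intro d'' c hd''
        exact pvValsNe_insertStep d'' _ _ hd''
      · exact hd'
    · exact hd
  · intro k l hl
    rw [PySem.Dict.get?_empty] at hl
    cases hl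

-- lookup in the value-mapped dict
lemma pvGet?_mapVal (l : List (String × List Int)) (f : List Int → List Int) (x : String) :
    (PySem.Dict.mk (l.map (fun kv => (kv.1, f kv.2))) : PySem.Dict String (List Int)).get? x =
      ((PySem.Dict.mk l : PySem.Dict String (List Int)).get? x).map f := by
  induction l with
  | nil => rfl
  | cons kv rest ih =>
    rw [List.map_cons]
    rcases kv with ⟨k, v⟩
    rw [PySem.Dict.get?_mk_cons, PySem.Dict.get?_mk_cons]
    by_cases h : k == x
    · simp [h]
    · simp [h, ih]

lemma pvGet?_sortVals (d : PySem.Dict String (List Int)) (x : String) :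
    (pvSortVals d).get? x = (d.get? x).map (fun l => PySem.List.sorted l (fun x => x) false) := by
  rcases d with ⟨items⟩
  exact pvGet?_mapVal items _ x

-- len(scores) - bisect_left(scores, x) on a sorted list counts the elements ≥ x
lemma pvBisect_count (xs : List Int) (x : Int) (hp : xs.Pairwise (fun a b => a ≤ b)) :
    (xs.length : Int) - (PySem.List.bisectLeft xs x : Int) =
      (xs.countP (fun s => decide (x ≤ s)) : Int) := by
  obtain ⟨hle, hlt, hge⟩ := PySem.List.bisectLeft_spec xs x hp
  set b := PySem.List.bisectLeft xs x with hb
  have hsplit : xs.countP (fun s => decide (x ≤ s)) =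
      (xs.take b).countP (fun s => decide (x ≤ s)) + (xs.drop b).countP (fun s => decide (x ≤ s)) := by
    conv_lhs => rw [← List.take_append_drop b xs]
    rw [List.countP_append]
  have htake : (xs.take b).countP (fun s => decide (x ≤ s)) = 0 := by
    rw [List.countP_eq_zero]
    intro a ha
    obtain ⟨i, hi, rfl⟩ := List.getElem_of_mem ha
    have hi' : i < b ∧ i < xs.length := by rw [List.length_take] at hi; omega
    have hx := hlt i hi'.2 hi'.1
    rw [List.getElem_take] at *
    simp only [decide_eq_true_eq]
    omega
  have hdrop : (xs.drop b).countP (fun s => decide (x ≤ s)) = (xs.drop b).length := by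
    rw [List.countP_eq_length]
    intro a ha
    obtain ⟨i, hi, rfl⟩ := List.getElem_of_mem ha
    rw [List.getElem_drop]
    have hilen : b + i < xs.length := by
      rw [List.length_drop] at hi; omega
    have := hge (b + i) hilen (by omega)
    simpa using this
  have hlen : (xs.drop b).length = xs.length - b := List.length_drop
  rw [hsplit, htake, hdrop, hlen]
  omega

-- the per-query step of A, on the sorted dict, equals appending B's per-query count
lemma pvStep_eq (d : PySem.Dict String (List Int)) (hinv : pvValsNe d)
    (ans : List Int) (q : String) :
    (let qList := pvRemoveAll "-" (pvRemoveAll "and" (PySem.Str.split₀ q))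
     let k := PySem.Str.join "" (PySem.List.slice qList none (some (-1)))
     let v := PySem.List.pyGetD qList (-1) ""
     if (pvSortVals d).contains k then
       let scores := (pvSortVals d).getD k []
       if scores ≠ [] then
         ans ++ [(scores.length : Int) - (PySem.List.bisectLeft scores ((PySem.Int.ofStr? v).getD 0) : Int)]
       else ans
     else ans ++ [(0 : Int)]) = ans ++ [pvQueryCount d q] := by
  simp only [pvRemoveAll_both, PySem.List.slice_to_neg_one, pvPyGetD_neg_one, pvQueryCount]
  set tokens := (PySem.Str.split₀ q).filter (fun t => !(t == "and" || t == "-")) with htok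
  set k := PySem.Str.join "" tokens.dropLast with hk
  have hcont : (pvSortVals d).contains k = d.contains k := by
    rw [PySem.Dict.contains_eq_isSome_get?, PySem.Dict.contains_eq_isSome_get?, pvGet?_sortVals]
    cases d.get? k <;> rfl
  rw [hcont]
  by_cases h : d.contains k
  · rw [if_pos h]
    obtain ⟨l, hl⟩ : ∃ l, d.get? k = some l := by
      rw [PySem.Dict.contains_eq_isSome_get?] at h
      cases hg : d.get? k
      · rw [hg] at h; simp at h
      · exact ⟨_, rfl⟩
    have hnil : l ≠ [] := hinv k l hl
    have hgd2 : (pvSortVals d).getD k [] = PySem.List.sorted l (fun x => x) false := by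
      rw [PySem.Dict.getD_eq_get?_getD, pvGet?_sortVals, hl]; rfl
    rw [hgd2, hl]
    have hsn : PySem.List.sorted l (fun x => x) false ≠ [] := by
      rw [Ne, PySem.List.sorted_eq_nil_iff]; exact hnil
    rw [if_pos hsn]
    set cutoff := (PySem.Int.ofStr? (tokens.getLast?.getD "")).getD 0 with hc
    show ans ++ [((PySem.List.sorted l (fun x => x) false).length : Int) -
        (PySem.List.bisectLeft (PySem.List.sorted l (fun x => x) false) cutoff : Int)] =
      ans ++ [l.foldl (fun n s => if cutoff ≤ s then n + 1 else n) (0 : Int)]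
    rw [PySem.List.foldl_ite_add_one (fun s => cutoff ≤ s) l 0]
    have hcount : l.countP (fun s => decide (cutoff ≤ s)) =
        (PySem.List.sorted l (fun x => x) false).countP (fun s => decide (cutoff ≤ s)) :=
      (List.Perm.countP_eq _ (PySem.List.sorted_perm l (fun x => x) false)).symm
    have hbc := pvBisect_count (PySem.List.sorted l (fun x => x) false) cutoff
      (PySem.List.sorted_pairwise l (fun x => x))
    rw [hbc, ← hcount]
    simp
  · rw [if_neg h]
    have hget : d.get? k = none := by
      rw [PySem.Dict.contains_eq_isSome_get?] at h
      cases hg : d.get? k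
      · rfl
      · rw [hg] at h; simp at h
    rw [hget]

-- ===== VERDICT (by name: the statement is the Claim_ definition above) =====
theorem solution_spec : Claim_equal_solution := by
  intro info query _ _
  unfold Spec_solution solution solution_alt
  rw [← pvBuild_eq]
  exact PySem.List.foldl_congr_mem query _
    (fun ans q => ans ++ [pvQueryCount (pvBuildB info) q]) []
    (fun ans q _ => pvStep_eq (pvBuildB info) (pvValsNe_buildB info) ans q)
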